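-- pv_equiv track=rewrite | github.com/boostcamp5wh/preparing-for-test | solution/26/gy.py | solution
-- ===== SOURCE A (Python) =====
-- import functools
--
-- def solution(sales, links):
--     n = len(sales)
--     sales = [-1] + sales # index 1 based
--     childrens = [[] for _ in range(n+1)]
--     for par, child in links:
--         childrens[par].append(child)
--
--     @functools.lru_cache(maxsize=2*n)
--     def dp(idx, optional):
--         children_opts = [dp(next_idx, True) for next_idx in childrens[idx]]
--         total_opts = sum(children_opts)
--         ret = sales[idx] + total_opts
--
--         if optional:
--             i = -1
--             for i, must_idx in enumerate(childrens[idx]):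
--                 ret = min(ret, total_opts - children_opts[i] + dp(must_idx, False))
--
--             if i == -1:
--                 ret = 0
--
--         return ret
--
--     answer = dp(1, True)
--     return answer
-- ===== SOURCE B (Python) =====
-- def solution(sales, links):
--     children = {}
--     for par, child in links:
--         children.setdefault(par, []).append(child)
--
--     def solve(idx):
--         # returns (f, t): f = cost if idx must attend, t = cost if optional
--         pairs = [solve(c) for c in children.get(idx, [])]
--         total = sum(t for _, t in pairs)
--         f = sales[idx - 1] + total
--         if not pairs:
--             t = 0
--         else:
--             t = min(f, min(total - tc + fc for fc, tc in pairs))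
--         return f, t
--
--     return solve(1)[1]
-- ===== Notes on version B (the rewrite author's own statement) =====
-- stated objective: simpler
-- what changed: One un-memoized post-order DFS returning the pair (mandatory-cost, optional-cost) per node over a dict-of-children, instead of a two-state lru_cache dp(idx, optional) over a padded list-of-lists with an enumerate/index inner loop.
-- outside the precondition, e.g. on solution([5, 4], [(-2, 2)]): A returns 4, B returns 0; on solution([3, 4], [(1, 2), (1, 2)]): A returns 3, B returns 3; on solution([5, 4, 3], [(1, 2), (3, 1)]): A returns 4, B returns 4
import Mathlib
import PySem

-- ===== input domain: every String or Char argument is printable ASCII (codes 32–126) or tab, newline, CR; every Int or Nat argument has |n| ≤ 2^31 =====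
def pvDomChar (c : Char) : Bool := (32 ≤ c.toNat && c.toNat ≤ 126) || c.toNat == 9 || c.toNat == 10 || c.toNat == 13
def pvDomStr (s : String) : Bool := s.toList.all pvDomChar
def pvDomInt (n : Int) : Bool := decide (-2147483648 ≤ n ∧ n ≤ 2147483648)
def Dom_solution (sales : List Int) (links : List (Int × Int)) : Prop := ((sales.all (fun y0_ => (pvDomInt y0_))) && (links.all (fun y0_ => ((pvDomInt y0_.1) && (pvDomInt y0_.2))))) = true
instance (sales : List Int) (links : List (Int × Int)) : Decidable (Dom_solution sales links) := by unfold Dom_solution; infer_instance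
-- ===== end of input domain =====

-- B replaces A's two-state lru_cache dp(idx, optional) over a padded list-of-lists (with an
-- enumerate/index inner loop) by one un-memoized post-order DFS returning (mandatory, optional)
-- cost pairs per node over a dict of children: simpler decomposition, same asymptotic cost.


-- ===== PORT A =====
-- childrens = [[] for _ in range(n+1)]; for par, child in links: childrens[par].append(child)
def buildChildrensA (n : Nat) (links : List (Int × Int)) : List (List Int) :=
  links.foldl
    (fun ch pc => PySem.List.pySetD ch pc.1 (PySem.List.pyGetD ch pc.1 [] ++ [pc.2]))
    (List.replicate (n + 1) [])

-- dp(idx, optional); fuel makes the recursion total (inside Pre_ depth ≤ n, so the fuel never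
-- runs out); the lru_cache is pure memoization and does not change the value.
def dpA (sales1 : List Int) (ch : List (List Int)) : Nat → Int → Bool → Int
  | 0, _, _ => 0
  | fuel + 1, idx, optional =>
    let kids := PySem.List.pyGetD ch idx []
    let opts := kids.map (fun k => dpA sales1 ch fuel k true)
    let total := opts.sum
    let ret := PySem.List.pyGetD sales1 idx 0 + total
    if optional then
      -- the for-loop over enumerate(childrens[idx]); 'if i == -1: ret = 0' = empty-kids case
      if kids = [] then 0
      else
        (PySem.List.enumerate kids).foldl
          (fun r p => min r (total - PySem.List.pyGetD opts p.1 0 + dpA sales1 ch fuel p.2 false))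
          ret
    else ret

def solution (sales : List Int) (links : List (Int × Int)) : Int :=
  dpA ((-1) :: sales) (buildChildrensA sales.length links) sales.length 1 true

-- ===== PORT B =====
-- children = {}; for par, child in links: children.setdefault(par, []).append(child)
def buildChildrenB (links : List (Int × Int)) : PySem.Dict Int (List Int) :=
  links.foldl (fun d pc => d.insert pc.1 (d.getD pc.1 [] ++ [pc.2])) PySem.Dict.empty

-- solve(idx) returning the pair (f, t); fuel makes the recursion total
def solveB (sales : List Int) (d : PySem.Dict Int (List Int)) : Nat → Int → Int × Int
  | 0, _ => (0, 0)
  | fuel + 1, idx =>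
    let pairs := (d.getD idx []).map (fun c => solveB sales d fuel c)
    let total := (pairs.map (fun p => p.2)).sum
    let f := PySem.List.pyGetD sales (idx - 1) 0 + total
    let t := if pairs = [] then 0
             else min f ((PySem.List.min? (pairs.map (fun p : Int × Int => total - p.2 + p.1)) (fun x => x)).getD 0)
    (f, t)

def solution_alt (sales : List Int) (links : List (Int × Int)) : Int :=
  (solveB sales (buildChildrenB links) sales.length 1).2

-- ===== PRECONDITION & SPEC =====
-- Pre_ admits exactly two kinds of inputs: ones whose edges never touch the root's bucket
-- (both programs answer 0 without recursing), and the problem's natural domain — links forming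
-- a tree/forest rooted at node 1 with in-range node labels, i.e. every parent in 0..n, every
-- every child of a parent ≥ 1 in 2..n and each node the child of at most one such link (any
-- parent-child label order; edges from parent 0 are inert — node 0's bucket is never visited);
-- it excludes inputs on which A raises (IndexError for an out-of-range parent, RecursionError
-- on a cycle reachable from the root, empty sales) and inputs whose value depends on A's
-- negative-index wraparound or on duplicate child links (shared subtrees).
def Pre_solution (sales : List Int) (links : List (Int × Int)) : Prop :=
  sales ≠ [] ∧
  (∀ pc ∈ links, -((sales.length : Int) + 1) ≤ pc.1 ∧ pc.1 ≤ (sales.length : Int)) ∧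
  ((∀ pc ∈ links, pc.1 ≠ 1 ∧ pc.1 ≠ -(sales.length : Int)) ∨
   ((∀ pc ∈ links,
      0 ≤ pc.1 ∧ pc.1 ≤ (sales.length : Int) ∧
      (1 ≤ pc.1 → 2 ≤ pc.2 ∧ pc.2 ≤ (sales.length : Int))) ∧
    ((links.filter (fun pc => decide (1 ≤ pc.1))).map Prod.snd).Nodup))
instance (sales : List Int) (links : List (Int × Int)) : Decidable (Pre_solution sales links) := by
  unfold Pre_solution; infer_instance
def pvWitness_solution : List Int × (List (Int × Int)) :=
  ([14, 21, 5, 999, 20, 8, 7, 17], [(1,2),(1,3),(3,4),(2,5),(2,6),(3,7),(4,8)])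

def Spec_solution (sales : List Int) (links : List (Int × Int)) (out : Int) : Prop := out = solution_alt sales links
instance (sales : List Int) (links : List (Int × Int)) (out : Int) : Decidable (Spec_solution sales links out) := by unfold Spec_solution; infer_instance

-- ===== CLAIM (what is proved, stated in full; the proofs are below) =====
def Claim_equal_solution : Prop := ∀ (sales : List Int) (links : List (Int × Int)), Dom_solution sales links → Pre_solution sales links → Spec_solution sales links (solution sales links)


-- ===== LEMMAS AND PROOFS =====

-- pyGetD at a non-negative index is List.getD at its toNat
theorem pv_pyGetD_nonneg {α : Type} {xs : List α} {i : Int} (h : 0 ≤ i) (d : α) :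
    PySem.List.pyGetD xs i d = xs.getD i.toNat d := by
  lift i to ℕ using h
  simp [PySem.List.pyGetD_natCast]

-- dropping the (-1) sentinel: sales1[idx] = sales[idx-1] for 1 ≤ idx
theorem pv_sales_shift (a : Int) (xs : List Int) {i : Int} (h : 1 ≤ i) (d : Int) :
    PySem.List.pyGetD (a :: xs) i d = PySem.List.pyGetD xs (i - 1) d := by
  rw [pv_pyGetD_nonneg (by omega) d, pv_pyGetD_nonneg (by omega) d]
  have : i.toNat = (i - 1).toNat + 1 := by omega
  rw [this, List.getD_cons_succ]

-- the invariant carried through the two children-building folds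
def pv_BuildInv (n : Nat) (ch : List (List Int)) (d : PySem.Dict Int (List Int)) : Prop :=
  ch.length = n + 1 ∧
  (∀ i : Int, 1 ≤ i → PySem.List.pyGetD ch i [] = d.getD i []) ∧
  (∀ i : Int, 1 ≤ i → ∀ x ∈ d.getD i [], 2 ≤ x ∧ x ≤ (n : Int))

theorem pv_build_inv (n : Nat) :
    ∀ (L : List (Int × Int)) (ch : List (List Int)) (d : PySem.Dict Int (List Int)),
    (∀ pc ∈ L, 0 ≤ pc.1 ∧ pc.1 ≤ (n : Int) ∧ (1 ≤ pc.1 → 2 ≤ pc.2 ∧ pc.2 ≤ (n : Int))) →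
    pv_BuildInv n ch d →
    pv_BuildInv n
      (L.foldl (fun ch pc => PySem.List.pySetD ch pc.1 (PySem.List.pyGetD ch pc.1 [] ++ [pc.2])) ch)
      (L.foldl (fun d pc => d.insert pc.1 (d.getD pc.1 [] ++ [pc.2])) d) := by
  intro L
  induction L with
  | nil => intro ch d _ hinv; exact hinv
  | cons pc rest ih =>
    intro ch d hL hinv
    obtain ⟨hlen, hlook, hmem⟩ := hinv
    obtain ⟨hp0, hpn, hord⟩ := hL pc (List.mem_cons_self)
    -- Python's childrens[par].append(..) lands at index par.toNat (par ≥ 0 here)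
    have hset : ∀ w, PySem.List.pySetD ch pc.1 w = ch.set pc.1.toNat w := by
      intro w
      exact PySem.List.pySetD_of_nonneg _ _ hp0
    have hplt : pc.1.toNat < ch.length := by omega
    simp only [List.foldl_cons]
    apply ih _ _ (fun q hq => hL q (List.mem_cons_of_mem _ hq))
    refine ⟨?_, ?_, ?_⟩
    · rw [hset]
      simp [hlen]
    · intro i hi
      rw [hset, pv_pyGetD_nonneg (by omega), PySem.Dict.getD_insert]
      by_cases hip : i = pc.1
      · subst hip
        have hp1 : (1 : Int) ≤ pc.1 := hi
        rw [if_pos rfl, List.getD_eq_getElem?_getD, List.getElem?_set_self (by omega)]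
        simp only [Option.getD_some]
        rw [hlook pc.1 hp1]
      · have hne : i.toNat ≠ pc.1.toNat := by omega
        rw [if_neg hip, List.getD_eq_getElem?_getD,
            List.getElem?_set_ne (by omega), ← List.getD_eq_getElem?_getD,
            ← pv_pyGetD_nonneg (by omega : (0:Int) ≤ i), hlook i hi]
    · intro i hi x hx
      rw [PySem.Dict.getD_insert] at hx
      by_cases hip : i = pc.1
      · rw [if_pos hip] at hx
        have hp1 : (1 : Int) ≤ pc.1 := hip ▸ hi
        rcases List.mem_append.mp hx with h | h
        · exact hmem pc.1 hp1 x h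
        · simp only [List.mem_singleton] at h
          subst h; exact hord hp1
      · rw [if_neg hip] at hx
        exact hmem i hi x hx

-- A's enumerate/index loop rewritten as a plain fold over the kids list
theorem pv_enum_fold (opts : List Int) (g h : Int → Int) (total : Int) :
    ∀ (ks : List Int) (s : Nat) (r : Int),
    (∀ (j : Nat), j < ks.length → ∀ (hj : j < ks.length), opts[s + j]? = some (h ks[j])) →
    (PySem.List.enumerate ks (s : Int)).foldl
        (fun r p => min r (total - PySem.List.pyGetD opts p.1 0 + g p.2)) r
      = ks.foldl (fun r k => min r (total - h k + g k)) r := by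
  intro ks
  induction ks with
  | nil => intro s r _; simp [PySem.List.enumerate_nil]
  | cons x t ih =>
    intro s r hidx
    rw [PySem.List.enumerate_cons, List.foldl_cons, List.foldl_cons]
    have hx : PySem.List.pyGetD opts (s : Int) 0 = h x := by
      rw [pv_pyGetD_nonneg (by positivity), List.getD_eq_getElem?_getD]
      have := hidx 0 (by simp) (by simp)
      simp only [Nat.add_zero] at this
      simp [this]
    rw [hx]
    have hs1 : ((s : Int) + 1) = ((s + 1 : Nat) : Int) := by push_cast; ring
    rw [hs1, ih (s + 1) _ ?_]
    intro j hj hj'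
    have := hidx (j + 1) (by simpa using Nat.succ_lt_succ hj) (by simpa using Nat.succ_lt_succ hj)
    simpa [Nat.add_assoc, Nat.add_comm 1 j] using this

-- the same, started at 0 (the start value dpA actually uses)
theorem pv_enum_fold0 (opts : List Int) (g h : Int → Int) (total : Int)
    (ks : List Int) (r : Int)
    (hidx : ∀ (j : Nat), j < ks.length → ∀ (hj : j < ks.length), opts[j]? = some (h ks[j])) :
    (PySem.List.enumerate ks 0).foldl
        (fun r p => min r (total - PySem.List.pyGetD opts p.1 0 + g p.2)) r
      = ks.foldl (fun r k => min r (total - h k + g k)) r := by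
  have := pv_enum_fold opts g h total ks 0 r (by simpa using hidx)
  simpa using this

-- pulling the initial accumulator out of a running-min fold
theorem pv_foldl_min_out : ∀ (l : List Int) (a b : Int),
    l.foldl min (min a b) = min a (l.foldl min b) := by
  intro l
  induction l with
  | nil => intro a b; rfl
  | cons x t ih => intro a b; rw [List.foldl_cons, List.foldl_cons, min_assoc, ih]

-- in the root-childless branch, A's bucket 1 stays empty through the build fold
theorem pv_bucket1_empty (n : Nat) :
    ∀ (L : List (Int × Int)) (ch : List (List Int)),
    (∀ pc ∈ L, -((n : Int) + 1) ≤ pc.1 ∧ pc.1 ≤ (n : Int) ∧ pc.1 ≠ 1 ∧ pc.1 ≠ -(n : Int)) →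
    ch.length = n + 1 → PySem.List.pyGetD ch 1 [] = [] →
    PySem.List.pyGetD
      (L.foldl (fun ch pc => PySem.List.pySetD ch pc.1 (PySem.List.pyGetD ch pc.1 [] ++ [pc.2])) ch)
      1 [] = [] := by
  intro L
  induction L with
  | nil => intro ch _ _ h1; exact h1
  | cons pc rest ih =>
    intro ch hL hlen h1
    obtain ⟨hlo, hhi, hne1, hnewrap⟩ := hL pc (List.mem_cons_self)
    -- the slot Python's childrens[par] writes to is never slot 1 here
    obtain ⟨J, hset, hJ⟩ : ∃ J : Nat,
        (∀ w, PySem.List.pySetD ch pc.1 w = ch.set J w) ∧ J ≠ 1 := by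
      by_cases hp : 0 ≤ pc.1
      · exact ⟨pc.1.toNat, fun w => PySem.List.pySetD_of_nonneg _ _ hp, by omega⟩
      · refine ⟨n + 1 - (-pc.1).toNat, fun w => ?_, by omega⟩
        unfold PySem.List.pySetD PySem.List.pySet? PySem.List.pyIdx?
        rw [hlen, if_neg (by omega), if_pos (by push_cast; omega)]
        simp
    simp only [List.foldl_cons]
    apply ih _ (fun q hq => hL q (List.mem_cons_of_mem _ hq))
    · rw [hset]; simp [hlen]
    · rw [pv_pyGetD_nonneg (by omega)] at h1
      rw [hset, pv_pyGetD_nonneg (by omega), List.getD_eq_getElem?_getD,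
          List.getElem?_set_ne (by omega), ← List.getD_eq_getElem?_getD]
      exact h1

-- and B's dict never receives key 1
theorem pv_key1_empty :
    ∀ (L : List (Int × Int)) (d : PySem.Dict Int (List Int)),
    (∀ pc ∈ L, pc.1 ≠ 1) → d.getD 1 [] = [] →
    (L.foldl (fun d pc => d.insert pc.1 (d.getD pc.1 [] ++ [pc.2])) d).getD 1 [] = [] := by
  intro L
  induction L with
  | nil => intro d _ h1; exact h1
  | cons pc rest ih =>
    intro d hL h1
    simp only [List.foldl_cons]
    apply ih _ (fun q hq => hL q (List.mem_cons_of_mem _ hq))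
    rw [PySem.Dict.getD_insert, if_neg (fun h => hL pc (List.mem_cons_self) h.symm)]
    exact h1

-- the core simulation: dpA's two states are the two components of solveB's pair
-- (both ports are fueled identically, so they agree at every fuel, cycle or not)
theorem pv_main (sales : List Int) (n : Nat) (ch : List (List Int))
    (d : PySem.Dict Int (List Int)) (hinv : pv_BuildInv n ch d) :
    ∀ (fuel : Nat) (idx : Int), 1 ≤ idx →
      dpA ((-1) :: sales) ch fuel idx false = (solveB sales d fuel idx).1 ∧
      dpA ((-1) :: sales) ch fuel idx true = (solveB sales d fuel idx).2 := by
  obtain ⟨hlen, hlook, hmem⟩ := hinv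
  intro fuel
  induction fuel with
  | zero => intro idx _; exact ⟨rfl, rfl⟩
  | succ fuel ih =>
    intro idx hidx
    have hkids : PySem.List.pyGetD ch idx [] = d.getD idx [] := hlook idx (by omega)
    have hopts : (d.getD idx []).map (fun k => dpA ((-1) :: sales) ch fuel k true)
        = (d.getD idx []).map (fun k => (solveB sales d fuel k).2) :=
      List.map_congr_left (fun k hkmem => (ih k (by have := hmem idx hidx k hkmem; omega)).2)
    have hsales : PySem.List.pyGetD ((-1) :: sales) idx 0
        = PySem.List.pyGetD sales (idx - 1) 0 := pv_sales_shift _ _ hidx _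
    have htot : ((d.getD idx []).map (fun k => dpA ((-1) :: sales) ch fuel k true)).sum
        = (((d.getD idx []).map (fun c => solveB sales d fuel c)).map (fun p => p.2)).sum := by
      rw [hopts, List.map_map]; rfl
    constructor
    · simp only [dpA, solveB, Bool.false_eq_true, if_false, hkids, htot, hsales]
    · simp only [dpA, solveB, if_true, hkids]
      by_cases hnil : d.getD idx [] = []
      · simp [hnil]
      · rw [if_neg hnil, if_neg (by simpa using hnil)]
        rw [pv_enum_fold0 (List.map (fun k => dpA ((-1) :: sales) ch fuel k true) (d.getD idx []))
              (fun k => dpA ((-1) :: sales) ch fuel k false)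
              (fun k => dpA ((-1) :: sales) ch fuel k true)
              ((List.map (fun k => dpA ((-1) :: sales) ch fuel k true) (d.getD idx [])).sum)
              (d.getD idx []) _
              (fun j hj hj' => by simp [List.getElem?_map, List.getElem?_eq_getElem hj])]
        rw [PySem.List.foldl_congr_mem _ _
              (fun r k => min r (((d.getD idx []).map (fun k => dpA ((-1) :: sales) ch fuel k true)).sum
                - (solveB sales d fuel k).2 + (solveB sales d fuel k).1) ) _
              (fun r k hkm => by
                rw [(ih k (by have := hmem idx hidx k hkm; omega)).1,
                    (ih k (by have := hmem idx hidx k hkm; omega)).2])]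
        rw [htot, hsales]
        simp only [List.map_map, Function.comp_def]
        rw [← List.foldl_map
              (f := fun k => ((d.getD idx []).map (fun c => (solveB sales d fuel c).2)).sum
                - (solveB sales d fuel k).2 + (solveB sales d fuel k).1) (g := min)]
        obtain ⟨c0, cs, hcands⟩ : ∃ c0 cs,
            (d.getD idx []).map (fun k => ((d.getD idx []).map (fun c => (solveB sales d fuel c).2)).sum
              - (solveB sales d fuel k).2 + (solveB sales d fuel k).1) = c0 :: cs := by
          rcases hx : (d.getD idx []).map (fun k => ((d.getD idx []).map (fun c => (solveB sales d fuel c).2)).sum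
              - (solveB sales d fuel k).2 + (solveB sales d fuel k).1) with _ | ⟨c0, cs⟩
          · exact absurd (List.map_eq_nil_iff.mp hx) hnil
          · exact ⟨c0, cs, rfl⟩
        rw [hcands, PySem.List.min?_id_cons, Option.getD_some, List.foldl_cons,
            pv_foldl_min_out]

-- ===== VERDICT (by name: the statement is the Claim_ definition above) =====
theorem solution_spec : Claim_equal_solution := by
  intro sales links _ hpre
  obtain ⟨hne, hrange, hbranch⟩ := hpre
  obtain ⟨s0, srest, rfl⟩ : ∃ s0 srest, sales = s0 :: srest := by
    cases sales with
    | nil => exact absurd rfl hne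
    | cons s0 srest => exact ⟨s0, srest, rfl⟩
  unfold Spec_solution solution solution_alt buildChildrensA buildChildrenB
  rcases hbranch with hroot | ⟨hlinks, _⟩
  · -- no edge reaches the root's bucket: both programs answer 0
    have hA : PySem.List.pyGetD
        (links.foldl (fun ch pc => PySem.List.pySetD ch pc.1 (PySem.List.pyGetD ch pc.1 [] ++ [pc.2]))
          (List.replicate ((s0 :: srest).length + 1) []))
        1 [] = [] := by
      apply pv_bucket1_empty (s0 :: srest).length links _
        (fun q hq => ⟨(hrange q hq).1, (hrange q hq).2, (hroot q hq).1, (hroot q hq).2⟩)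
        (by simp)
      rw [pv_pyGetD_nonneg (by omega)]
      simp [List.getD_eq_getElem?_getD]
    have hB : (links.foldl (fun d pc => d.insert pc.1 (d.getD pc.1 [] ++ [pc.2]))
        (PySem.Dict.empty (κ := Int) (ν := List Int))).getD 1 [] = [] := by
      apply pv_key1_empty links _ (fun q hq => (hroot q hq).1)
      simp [PySem.Dict.getD, PySem.Dict.get?, PySem.Dict.empty]
    simp only [List.length_cons] at hA hB ⊢
    simp only [dpA, solveB, hA, hB]
    simp
  · have hinv0 : pv_BuildInv (s0 :: srest).length
        (List.replicate ((s0 :: srest).length + 1) []) PySem.Dict.empty := by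
      refine ⟨by simp, ?_, ?_⟩
      · intro i hi
        rw [pv_pyGetD_nonneg (by omega)]
        simp only [List.getD_eq_getElem?_getD, List.getElem?_replicate, PySem.Dict.getD]
        split_ifs <;> simp [PySem.Dict.get?, PySem.Dict.empty]
      · intro i _ x hx
        simp [PySem.Dict.getD] at hx
    exact (pv_main (s0 :: srest) (s0 :: srest).length _ _
      (pv_build_inv (s0 :: srest).length links _ _ hlinks hinv0)
      (s0 :: srest).length 1 (le_refl 1)).2
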